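-- pv_equiv track=rewrite | github.com/kevinjacb/Tabulate | tabulate.py | label_borders
-- ===== SOURCE A (Python) =====
-- def top_bottom_borders(top,column_size,max_length = []):
--     table = ""
--     for j in range(column_size):
--         if top:
--                 if j == 0 :
--                     table += "┌"+"─"*(max_length[j]+2)
--
--                 elif j != 0 and j != column_size -1:
--                      table +="┬"+"─"*(max_length[j]+2)
--
--                 if j == column_size -1 and column_size != 1:
--                     table += "┬"+"─"*(max_length[j]+2)+ "┐\n"
--
--                 elif j == column_size -1 and column_size == 1:
--                     table += "┐\n"
--
--         else:
--                 if j == 0: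
--                     table += "\n"
--                     table += "└"+"─"*(max_length[j]+2)
--
--                 elif j != 0 and j != column_size -1:
--                     table +=  "┴"+"─"*(max_length[j]+2)
--
--                 if j == column_size - 1 and column_size != 1:
--                     table +="┴"+"─"*(max_length[j]+2)+ "┘"
--
--                 elif j == column_size -1 and column_size == 1:
--                     table += "┘"
--
--     return table
--
-- def label_borders(labels,max_length,columns,rows, centered = False):
--     table = ""
--     table2 = ""
--     table += top_bottom_borders(True, columns, max_length)
--     for j in range(columns):
--         curr_len = len(str(labels[j]))
--         extra_space = max_length[j] - curr_len +1
--         remainder = extra_space - int(extra_space/2) - 1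
--         if j != columns -1:
--             if centered:
--                 table +=  "│"+" "*(remainder + 1)+ str(labels[j])+" "*(max_length[j] - curr_len + 1 - remainder)
--             else :
--                 table += "│ "+ str(labels[j])+" "*extra_space
--         else:
--             if centered:
--                 table +=  "│"+" "*(remainder + 1) + str(labels[j])+" "*(max_length[j] - curr_len + 1 - remainder)+"│"
--             else:
--                 table +=  "│ "+ str(labels[j])+" "*extra_space+"│"
--
--         if j == 0 and columns  -1 != 0:
--             table2 +=  "├"+"─"*(max_length[j]+2) +"┼"
--         elif j==0:
--             table2 +=  "├"+"─"*(max_length[j]+2)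
--
--         if j != 0 and j != columns - 1 and columns -1 != 0:
--             table2 +=  "─"*(max_length[j]+2)+"┼"
--         elif j == columns - 1 and columns-1 == 0:
--             table2+="┤"
--         elif j == columns-1 :
--             table2 +=  "─"*(max_length[j]+2)+"┤"
--
--     table += "\n"
--     table += table2
--     table += "\n"
--     return table
-- ===== SOURCE B (Python) =====
-- def label_borders(labels, max_length, columns, rows, centered=False):
--     # Build the three rows by per-row join construction instead of per-column branching.
--     if columns <= 0:
--         return "\n\n"
--     dashes = ["\u2500" * (max_length[j] + 2) for j in range(columns)]
--     top = "\u250c" + "\u252c".join(dashes) + "\u2510\n"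
--     cells = []
--     for j in range(columns):
--         label = str(labels[j])
--         extra = max_length[j] - len(label) + 1
--         if centered:
--             rem = extra - int(extra / 2) - 1
--             cells.append(" " * (rem + 1) + label + " " * (extra - rem))
--         else:
--             cells.append(" " + label + " " * extra)
--     row = "\u2502" + "\u2502".join(cells) + "\u2502"
--     sep = "\u251c" + "\u253c".join(dashes) + "\u2524"
--     return top + row + "\n" + sep + "\n"
-- ===== Notes on version B (the rewrite author's own statement) =====
-- stated objective: simpler
-- what changed: A builds the three output rows in one loop over columns with positional if/elif branching (plus a second branchy helper loop for the top border); B computes the per-column dash and cell strings once and assembles each of the three rows as open + separator.join(pieces) + close.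
import Mathlib
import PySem

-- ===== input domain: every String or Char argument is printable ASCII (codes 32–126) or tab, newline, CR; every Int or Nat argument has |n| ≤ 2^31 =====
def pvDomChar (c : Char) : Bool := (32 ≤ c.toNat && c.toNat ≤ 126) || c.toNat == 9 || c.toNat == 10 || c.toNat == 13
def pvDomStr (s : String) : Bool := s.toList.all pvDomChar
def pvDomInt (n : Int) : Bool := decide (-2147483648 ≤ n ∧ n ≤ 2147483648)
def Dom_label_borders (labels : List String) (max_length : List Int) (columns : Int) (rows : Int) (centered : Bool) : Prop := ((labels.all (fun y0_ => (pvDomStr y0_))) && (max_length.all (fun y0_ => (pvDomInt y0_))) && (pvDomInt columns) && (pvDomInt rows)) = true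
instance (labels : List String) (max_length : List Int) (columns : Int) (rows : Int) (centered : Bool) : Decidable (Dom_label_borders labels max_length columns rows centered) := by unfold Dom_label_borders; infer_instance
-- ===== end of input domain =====

-- B builds each of the three table rows by a per-row join over per-column pieces instead of
-- A's single loop with positional branching (objective: simpler); return values agree on Pre_.

-- ===== PORT A =====
-- Python's  s * k  on strings (k copies, empty for k ≤ 0); used by both ports.
def pyRep (c : Char) (n : Int) : String := String.ofList (List.replicate n.toNat c)

def top_bottom_borders (top : Bool) (column_size : Int) (max_length : List Int) : String :=
  (PySem.List.pyRange 0 column_size).foldl (fun table j =>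
    let ml := PySem.List.pyGetD max_length j 0   -- max_length[j]; IndexError excluded by Pre_
    if top then
      let table :=
        if j = 0 then table ++ "┌" ++ pyRep '─' (ml + 2)
        else if j ≠ 0 ∧ j ≠ column_size - 1 then table ++ "┬" ++ pyRep '─' (ml + 2)
        else table
      if j = column_size - 1 ∧ column_size ≠ 1 then table ++ "┬" ++ pyRep '─' (ml + 2) ++ "┐\n"
      else if j = column_size - 1 ∧ column_size = 1 then table ++ "┐\n"
      else table
    else
      let table :=
        if j = 0 then table ++ "\n" ++ "└" ++ pyRep '─' (ml + 2)
        else if j ≠ 0 ∧ j ≠ column_size - 1 then table ++ "┴" ++ pyRep '─' (ml + 2)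
        else table
      if j = column_size - 1 ∧ column_size ≠ 1 then table ++ "┴" ++ pyRep '─' (ml + 2) ++ "┘"
      else if j = column_size - 1 ∧ column_size = 1 then table ++ "┘"
      else table) ""

def label_borders (labels : List String) (max_length : List Int) (columns : Int) (rows : Int) (centered : Bool) : String :=
  let table := top_bottom_borders true columns max_length
  let st := (PySem.List.pyRange 0 columns).foldl (fun (st : String × String) j =>
    let lab := PySem.List.pyGetD labels j ""     -- str(labels[j]); IndexError excluded by Pre_
    let curr_len : Int := PySem.Str.len lab
    let ml := PySem.List.pyGetD max_length j 0
    let extra_space := ml - curr_len + 1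
    let remainder := extra_space - PySem.Int.truncdiv extra_space 2 - 1   -- int(extra_space/2)
    let table :=
      if j ≠ columns - 1 then
        if centered then st.1 ++ "│" ++ pyRep ' ' (remainder + 1) ++ lab ++ pyRep ' ' (ml - curr_len + 1 - remainder)
        else st.1 ++ "│ " ++ lab ++ pyRep ' ' extra_space
      else
        if centered then st.1 ++ "│" ++ pyRep ' ' (remainder + 1) ++ lab ++ pyRep ' ' (ml - curr_len + 1 - remainder) ++ "│"
        else st.1 ++ "│ " ++ lab ++ pyRep ' ' extra_space ++ "│"
    let table2 :=
      if j = 0 ∧ columns - 1 ≠ 0 then st.2 ++ "├" ++ pyRep '─' (ml + 2) ++ "┼"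
      else if j = 0 then st.2 ++ "├" ++ pyRep '─' (ml + 2)
      else st.2
    let table2 :=
      if j ≠ 0 ∧ j ≠ columns - 1 ∧ columns - 1 ≠ 0 then table2 ++ pyRep '─' (ml + 2) ++ "┼"
      else if j = columns - 1 ∧ columns - 1 = 0 then table2 ++ "┤"
      else if j = columns - 1 then table2 ++ pyRep '─' (ml + 2) ++ "┤"
      else table2
    (table, table2)) (table, "")
  st.1 ++ "\n" ++ st.2 ++ "\n"

-- ===== PORT B =====
def altDash (max_length : List Int) (j : Int) : String :=
  pyRep '─' (PySem.List.pyGetD max_length j 0 + 2)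

def altCell (labels : List String) (max_length : List Int) (centered : Bool) (j : Int) : String :=
  let lab := PySem.List.pyGetD labels j ""
  let extra := PySem.List.pyGetD max_length j 0 - PySem.Str.len lab + 1
  if centered then
    let rem := extra - PySem.Int.truncdiv extra 2 - 1
    pyRep ' ' (rem + 1) ++ lab ++ pyRep ' ' (extra - rem)
  else " " ++ lab ++ pyRep ' ' extra

def label_borders_alt (labels : List String) (max_length : List Int) (columns : Int) (rows : Int) (centered : Bool) : String :=
  if columns ≤ 0 then "\n\n"
  else
    let idx := PySem.List.pyRange 0 columns
    let dashes := idx.map (altDash max_length)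
    let top := "┌" ++ PySem.Str.join "┬" dashes ++ "┐\n"
    let cells := idx.map (altCell labels max_length centered)
    let row := "│" ++ PySem.Str.join "│" cells ++ "│"
    let sep := "├" ++ PySem.Str.join "┼" dashes ++ "┤"
    top ++ row ++ "\n" ++ sep ++ "\n"

-- ===== PRECONDITION & SPEC =====
-- A (and B) index labels[j] and max_length[j] for every 0 ≤ j < columns: Pre_ excludes exactly
-- the inputs on which Python A raises IndexError.
def Pre_label_borders (labels : List String) (max_length : List Int) (columns : Int) (rows : Int) (centered : Bool) : Prop :=
  columns ≤ (labels.length : Int) ∧ columns ≤ (max_length.length : Int)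
instance (labels : List String) (max_length : List Int) (columns : Int) (rows : Int) (centered : Bool) : Decidable (Pre_label_borders labels max_length columns rows centered) := by unfold Pre_label_borders; infer_instance
def pvWitness_label_borders : List String × List Int × Int × Int × Bool := (["id", "name"], [3, 5], 2, 1, true)

def Spec_label_borders (labels : List String) (max_length : List Int) (columns : Int) (rows : Int) (centered : Bool) (out : String) : Prop := out = label_borders_alt labels max_length columns rows centered
instance (labels : List String) (max_length : List Int) (columns : Int) (rows : Int) (centered : Bool) (out : String) : Decidable (Spec_label_borders labels max_length columns rows centered out) := by unfold Spec_label_borders; infer_instance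

-- ===== CLAIM (what is proved, stated in full; the proofs are below) =====
def Claim_equal_label_borders : Prop := ∀ (labels : List String) (max_length : List Int) (columns : Int) (rows : Int) (centered : Bool), Dom_label_borders labels max_length columns rows centered → Pre_label_borders labels max_length columns rows centered → Spec_label_borders labels max_length columns rows centered (label_borders labels max_length columns rows centered)

-- ===== LEMMAS AND PROOFS =====

theorem pv_foldl_strcat (l : List String) (init : String) :
    l.foldl (fun r s => r ++ s) init = init ++ String.join l := by
  induction l generalizing init with
  | nil => simp [String.join]
  | cons a t ih =>
      have hc : String.join (a :: t) = a ++ String.join t := by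
        rw [show String.join (a :: t) = List.foldl (fun r s => r ++ s) "" (a :: t) from rfl,
            List.foldl_cons, String.empty_append, ih]
      simp only [List.foldl_cons]
      rw [ih, hc, String.append_assoc]

theorem pv_join_cons (a : String) (l : List String) :
    String.join (a :: l) = a ++ String.join l := by
  rw [show String.join (a :: l) = List.foldl (fun r s => r ++ s) "" (a :: l) from rfl,
      List.foldl_cons, String.empty_append, pv_foldl_strcat]

theorem pv_join_snoc (l : List String) (x : String) :
    String.join (l ++ [x]) = String.join l ++ x := by
  rw [show String.join (l ++ [x]) = List.foldl (fun r s => r ++ s) "" (l ++ [x]) from rfl,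
      List.foldl_append]
  simp only [List.foldl_cons, List.foldl_nil]
  rfl

theorem pv_foldl_append_str (c : Int → String) (l : List Int) (init : String) :
    l.foldl (fun s j => s ++ c j) init = init ++ String.join (l.map c) := by
  rw [← List.foldl_map, pv_foldl_strcat]

theorem pv_sjoin_singleton (sep a : String) : PySem.Str.join sep [a] = a := by
  apply String.toList_inj.mp
  simp [PySem.Str.toList_join, PySem.Chars.join_singleton]

theorem pv_sjoin_cons_cons (sep a b : String) (l : List String) :
    PySem.Str.join sep (a :: b :: l) = a ++ sep ++ PySem.Str.join sep (b :: l) := by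
  apply String.toList_inj.mp
  simp [PySem.Str.toList_join, PySem.Chars.join_cons_cons, String.toList_append]

theorem pv_sjoin_snoc (sep x : String) (l : List String) (h : l ≠ []) :
    PySem.Str.join sep (l ++ [x]) = PySem.Str.join sep l ++ sep ++ x := by
  induction l with
  | nil => exact absurd rfl h
  | cons a t ih =>
      cases t with
      | nil => simp [pv_sjoin_cons_cons, pv_sjoin_singleton]
      | cons b u =>
          have := ih (by simp)
          simp only [List.cons_append] at *
          rw [pv_sjoin_cons_cons, this, pv_sjoin_cons_cons]
          simp [String.append_assoc]

-- join of "open/sep/close"-shaped per-column pieces over range(n), no-close form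
theorem pv_H (P Q S : String) (seg : Int → String) :
    ∀ n : Int, 1 ≤ n →
      String.join ((PySem.List.pyRange 0 n).map (fun j => (if j = 0 then P else Q) ++ seg j ++ S))
        = P ++ PySem.Str.join (S ++ Q) ((PySem.List.pyRange 0 n).map seg) ++ S := by
  intro n hn
  have h01 : PySem.List.pyRange 0 1 = [0] := by
    simpa using PySem.List.pyRange_one_singleton 0
  induction n, hn using Int.le_induction with
  | base =>
      rw [h01]
      norm_num [pv_join_cons, String.join, pv_sjoin_singleton, String.append_assoc]
  | succ n hn ih =>
      rw [PySem.List.pyRange_one_succ_right (by omega)]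
      have hne : ((PySem.List.pyRange 0 n).map seg) ≠ [] := by
        intro h
        have := congrArg List.length h
        simp [PySem.List.length_pyRange_one] at this
        omega
      rw [List.map_append, List.map_append]
      simp only [List.map_cons, List.map_nil]
      rw [pv_join_snoc, pv_sjoin_snoc _ _ _ hne, ih]
      have hn0 : n ≠ 0 := by omega
      simp [hn0, String.append_assoc]

-- join of "open/sep/close"-shaped per-column pieces over range(n) = open ++ sep-join ++ close
theorem pv_master (P Q R S : String) (seg : Int → String) (n : Int) (hn : 1 ≤ n) :
    String.join ((PySem.List.pyRange 0 n).map
        (fun j => (if j = 0 then P else Q) ++ seg j ++ (if j = n - 1 then R else S)))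
      = P ++ PySem.Str.join (S ++ Q) ((PySem.List.pyRange 0 n).map seg) ++ R := by
  have h01 : PySem.List.pyRange 0 1 = [0] := by
    simpa using PySem.List.pyRange_one_singleton 0
  rcases eq_or_lt_of_le hn with h1 | h2
  · rw [← h1, h01]
    norm_num [pv_join_cons, String.join, pv_sjoin_singleton, String.append_assoc]
  · -- n ≥ 2: split off the last column
    have hsplit : PySem.List.pyRange 0 n = PySem.List.pyRange 0 (n - 1) ++ [n - 1] := by
      have := PySem.List.pyRange_one_succ_right (a := 0) (b := n - 1) (by omega)
      simpa [sub_add_cancel] using this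
    rw [hsplit]
    have hcong : (PySem.List.pyRange 0 (n - 1)).map
          (fun j => (if j = 0 then P else Q) ++ seg j ++ (if j = n - 1 then R else S))
        = (PySem.List.pyRange 0 (n - 1)).map (fun j => (if j = 0 then P else Q) ++ seg j ++ S) := by
      apply List.map_eq_map_iff.mpr
      intro j hj
      rw [PySem.List.mem_pyRange_one] at hj
      have : j ≠ n - 1 := by omega
      simp [this]
    have hne : ((PySem.List.pyRange 0 (n - 1)).map seg) ≠ [] := by
      intro h
      have := congrArg List.length h
      simp [PySem.List.length_pyRange_one] at this
      omega
    rw [List.map_append, List.map_append]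
    simp only [List.map_cons, List.map_nil]
    rw [pv_join_snoc, pv_sjoin_snoc _ _ _ hne, hcong,
        pv_H P Q S seg (n - 1) (by omega)]
    have hn1 : (n : Int) - 1 ≠ 0 := by omega
    simp [hn1, String.append_assoc]

-- the per-column piece A's top-border loop appends at column j (top = True)
def pvTopPiece (max_length : List Int) (n j : Int) : String :=
  (if j = 0 then "┌" ++ altDash max_length j
   else if j ≠ 0 ∧ j ≠ n - 1 then "┬" ++ altDash max_length j
   else "") ++
  (if j = n - 1 ∧ n ≠ 1 then "┬" ++ altDash max_length j ++ "┐\n"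
   else if j = n - 1 ∧ n = 1 then "┐\n"
   else "")

theorem pv_top_fold (n : Int) (max_length : List Int) :
    top_bottom_borders true n max_length
      = String.join ((PySem.List.pyRange 0 n).map (pvTopPiece max_length n)) := by
  unfold top_bottom_borders
  rw [List.foldl_ext _ (fun (s : String) j => s ++ pvTopPiece max_length n j)
      (H := by
        intro s j _
        simp only [pvTopPiece, altDash]
        split_ifs <;> simp only [String.append_assoc, String.append_empty, String.empty_append])]
  rw [pv_foldl_append_str, String.empty_append]

theorem pv_top (n : Int) (max_length : List Int) (hn : 1 ≤ n) :
    top_bottom_borders true n max_length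
      = "┌" ++ PySem.Str.join "┬" ((PySem.List.pyRange 0 n).map (altDash max_length)) ++ "┐\n" := by
  rw [pv_top_fold]
  have hcong : (PySem.List.pyRange 0 n).map (pvTopPiece max_length n)
      = (PySem.List.pyRange 0 n).map
          (fun j => (if j = 0 then "┌" else "┬") ++ altDash max_length j ++ (if j = n - 1 then "┐\n" else "")) := by
    apply List.map_eq_map_iff.mpr
    intro j hj
    rw [PySem.List.mem_pyRange_one] at hj
    simp only [pvTopPiece]
    split_ifs <;>
      first
      | (exfalso; omega)
      | simp only [String.append_assoc, String.append_empty, String.empty_append]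
  rw [hcong, pv_master "┌" "┬" "┐\n" "" (altDash max_length) n hn, String.empty_append]

-- the loop body of A's label loop, named so the pair-fold can be split
def pvBodyA (labels : List String) (max_length : List Int) (columns : Int) (centered : Bool)
    (st : String × String) (j : Int) : String × String :=
  let lab := PySem.List.pyGetD labels j ""
  let curr_len : Int := PySem.Str.len lab
  let ml := PySem.List.pyGetD max_length j 0
  let extra_space := ml - curr_len + 1
  let remainder := extra_space - PySem.Int.truncdiv extra_space 2 - 1
  let table :=
    if j ≠ columns - 1 then
      if centered then st.1 ++ "│" ++ pyRep ' ' (remainder + 1) ++ lab ++ pyRep ' ' (ml - curr_len + 1 - remainder)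
      else st.1 ++ "│ " ++ lab ++ pyRep ' ' extra_space
    else
      if centered then st.1 ++ "│" ++ pyRep ' ' (remainder + 1) ++ lab ++ pyRep ' ' (ml - curr_len + 1 - remainder) ++ "│"
      else st.1 ++ "│ " ++ lab ++ pyRep ' ' extra_space ++ "│"
  let table2 :=
    if j = 0 ∧ columns - 1 ≠ 0 then st.2 ++ "├" ++ pyRep '─' (ml + 2) ++ "┼"
    else if j = 0 then st.2 ++ "├" ++ pyRep '─' (ml + 2)
    else st.2
  let table2 :=
    if j ≠ 0 ∧ j ≠ columns - 1 ∧ columns - 1 ≠ 0 then table2 ++ pyRep '─' (ml + 2) ++ "┼"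
    else if j = columns - 1 ∧ columns - 1 = 0 then table2 ++ "┤"
    else if j = columns - 1 then table2 ++ pyRep '─' (ml + 2) ++ "┤"
    else table2
  (table, table2)

-- A's label-loop body appends one row piece and one separator piece
theorem pv_bodyA_split (labels : List String) (max_length : List Int) (columns : Int) (centered : Bool)
    (st : String × String) (j : Int) :
    pvBodyA labels max_length columns centered st j
      = (st.1 ++ (if j ≠ columns - 1 then "│" ++ altCell labels max_length centered j
                  else "│" ++ altCell labels max_length centered j ++ "│"),
         st.2 ++ ((if j = 0 ∧ columns - 1 ≠ 0 then "├" ++ altDash max_length j ++ "┼"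
                   else if j = 0 then "├" ++ altDash max_length j
                   else "") ++
                  (if j ≠ 0 ∧ j ≠ columns - 1 ∧ columns - 1 ≠ 0 then altDash max_length j ++ "┼"
                   else if j = columns - 1 ∧ columns - 1 = 0 then "┤"
                   else if j = columns - 1 then altDash max_length j ++ "┤"
                   else ""))) := by
  simp only [pvBodyA, altCell, altDash]
  rw [show ("│ " : String) = "│" ++ " " from by decide]
  split_ifs <;>
    simp only [String.append_assoc, String.append_empty, String.empty_append]

theorem pv_label_fold (labels : List String) (max_length : List Int) (columns : Int) (centered : Bool) :
    ∀ (l : List Int) (t1 t2 : String),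
      l.foldl (pvBodyA labels max_length columns centered) (t1, t2)
        = (l.foldl (fun s j =>
              s ++ (if j ≠ columns - 1 then "│" ++ altCell labels max_length centered j
                    else "│" ++ altCell labels max_length centered j ++ "│")) t1,
           l.foldl (fun s j =>
              s ++ ((if j = 0 ∧ columns - 1 ≠ 0 then "├" ++ altDash max_length j ++ "┼"
                     else if j = 0 then "├" ++ altDash max_length j
                     else "") ++
                    (if j ≠ 0 ∧ j ≠ columns - 1 ∧ columns - 1 ≠ 0 then altDash max_length j ++ "┼"
                     else if j = columns - 1 ∧ columns - 1 = 0 then "┤"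
                     else if j = columns - 1 then altDash max_length j ++ "┤"
                     else ""))) t2) := by
  intro l
  induction l with
  | nil => intro t1 t2; rfl
  | cons a t ih =>
      intro t1 t2
      simp only [List.foldl_cons]
      rw [pv_bodyA_split, ih]

theorem pv_row (labels : List String) (max_length : List Int) (n : Int) (centered : Bool)
    (hn : 1 ≤ n) (t1 : String) :
    (PySem.List.pyRange 0 n).foldl (fun s j =>
        s ++ (if j ≠ n - 1 then "│" ++ altCell labels max_length centered j
              else "│" ++ altCell labels max_length centered j ++ "│")) t1
      = t1 ++ ("│" ++ PySem.Str.join "│" ((PySem.List.pyRange 0 n).map (altCell labels max_length centered)) ++ "│") := by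
  rw [pv_foldl_append_str]
  have hcong : (PySem.List.pyRange 0 n).map (fun j =>
        if j ≠ n - 1 then "│" ++ altCell labels max_length centered j
        else "│" ++ altCell labels max_length centered j ++ "│")
      = (PySem.List.pyRange 0 n).map (fun j =>
          (if j = 0 then "│" else "│") ++ altCell labels max_length centered j ++ (if j = n - 1 then "│" else "")) := by
    apply List.map_eq_map_iff.mpr
    intro j hj
    split_ifs <;>
      first
      | (exfalso; omega)
      | simp only [String.append_assoc, String.append_empty]
  rw [hcong, pv_master "│" "│" "│" "" (altCell labels max_length centered) n hn, String.empty_append]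

theorem pv_sep (max_length : List Int) (n : Int) (hn : 1 ≤ n) (t2 : String) :
    (PySem.List.pyRange 0 n).foldl (fun s j =>
        s ++ ((if j = 0 ∧ n - 1 ≠ 0 then "├" ++ altDash max_length j ++ "┼"
               else if j = 0 then "├" ++ altDash max_length j
               else "") ++
              (if j ≠ 0 ∧ j ≠ n - 1 ∧ n - 1 ≠ 0 then altDash max_length j ++ "┼"
               else if j = n - 1 ∧ n - 1 = 0 then "┤"
               else if j = n - 1 then altDash max_length j ++ "┤"
               else ""))) t2
      = t2 ++ ("├" ++ PySem.Str.join "┼" ((PySem.List.pyRange 0 n).map (altDash max_length)) ++ "┤") := by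
  rw [pv_foldl_append_str]
  have hcong : (PySem.List.pyRange 0 n).map (fun j =>
        (if j = 0 ∧ n - 1 ≠ 0 then "├" ++ altDash max_length j ++ "┼"
         else if j = 0 then "├" ++ altDash max_length j
         else "") ++
        (if j ≠ 0 ∧ j ≠ n - 1 ∧ n - 1 ≠ 0 then altDash max_length j ++ "┼"
         else if j = n - 1 ∧ n - 1 = 0 then "┤"
         else if j = n - 1 then altDash max_length j ++ "┤"
         else ""))
      = (PySem.List.pyRange 0 n).map (fun j =>
          (if j = 0 then "├" else "") ++ altDash max_length j ++ (if j = n - 1 then "┤" else "┼")) := by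
    apply List.map_eq_map_iff.mpr
    intro j hj
    rw [PySem.List.mem_pyRange_one] at hj
    split_ifs <;>
      first
      | (exfalso; omega)
      | simp only [String.append_assoc, String.append_empty, String.empty_append]
  rw [hcong, pv_master "├" "" "┤" "┼" (altDash max_length) n hn, String.append_empty]

-- A's whole label_borders, with the loop body named (definitional)
theorem pv_label_eq (labels : List String) (max_length : List Int) (columns : Int) (rows : Int)
    (centered : Bool) :
    label_borders labels max_length columns rows centered
      = ((PySem.List.pyRange 0 columns).foldl (pvBodyA labels max_length columns centered)
          (top_bottom_borders true columns max_length, "")).1 ++ "\n"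
        ++ ((PySem.List.pyRange 0 columns).foldl (pvBodyA labels max_length columns centered)
          (top_bottom_borders true columns max_length, "")).2 ++ "\n" := rfl

theorem pv_main (labels : List String) (max_length : List Int) (columns : Int) (rows : Int)
    (centered : Bool) :
    label_borders labels max_length columns rows centered
      = label_borders_alt labels max_length columns rows centered := by
  rw [pv_label_eq, pv_label_fold]
  by_cases hn : columns ≤ 0
  · have hr : PySem.List.pyRange 0 columns = [] := PySem.List.pyRange_one_eq_nil hn
    unfold label_borders_alt top_bottom_borders
    rw [hr, if_pos hn]
    simp only [List.foldl_nil]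
    decide
  · have h1 : (1 : Int) ≤ columns := by omega
    unfold label_borders_alt
    rw [if_neg hn]
    simp only []
    rw [pv_row labels max_length columns centered h1,
        pv_sep max_length columns h1,
        pv_top columns max_length h1]
    rw [String.empty_append]

-- ===== VERDICT (by name: the statement is the Claim_ definition above) =====
theorem label_borders_spec : Claim_equal_label_borders := by
  intro labels max_length columns rows centered _ _
  exact pv_main labels max_length columns rows centered
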